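-- pv_equiv track=rewrite | github.com/Neurojedi/Biofunctions | utils/recursive_neighbors.py | recursive_neighbors
-- ===== SOURCE A (Python) =====
-- chars = "ACGT"
--
-- def recursive_neighbors(pattern, d):
--     assert(d <= len(pattern))
--
--     if d == 0:
--         return [pattern] # base case
--
--     neighbors_reduced = recursive_neighbors(pattern[1:], d-1)
--     new_arr= [c + n for n in neighbors_reduced for c in chars if c != pattern[0]]
--
--     if (d < len(pattern)):
--         neighbors_reduced = recursive_neighbors(pattern[1:], d)
--         new_arr += [pattern[0] + n for n in neighbors_reduced]
--
--     return new_arr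
-- ===== SOURCE B (Python) =====
-- chars = "ACGT"
--
-- def recursive_neighbors(pattern, d):
--     assert(d <= len(pattern))
--     # Bottom-up DP over suffixes of pattern: row[k] = neighbors of the
--     # current suffix at Hamming distance exactly k, for k = 0..min(len(suffix), d).
--     row = [[""]]
--     for head in reversed(pattern):
--         mut = [[c + s for s in lvl for c in chars if c != head] for lvl in row]
--         keep = [[head + s for s in lvl] for lvl in row]
--         new_row = [keep[0]] + [m + k for m, k in zip(mut, keep[1:])] + [mut[-1]]
--         row = new_row[:d + 1]
--     return row[d]
-- ===== Notes on version B (the rewrite author's own statement) =====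
-- stated objective: alternative
-- what changed: Replaces A's top-down double recursion over (suffix, d) by a single bottom-up dynamic-programming pass over the suffixes of pattern that maintains one row of distance-levels (row[k] = neighbors of the current suffix at exact distance k, truncated at d), returning row[d].
import Mathlib
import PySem

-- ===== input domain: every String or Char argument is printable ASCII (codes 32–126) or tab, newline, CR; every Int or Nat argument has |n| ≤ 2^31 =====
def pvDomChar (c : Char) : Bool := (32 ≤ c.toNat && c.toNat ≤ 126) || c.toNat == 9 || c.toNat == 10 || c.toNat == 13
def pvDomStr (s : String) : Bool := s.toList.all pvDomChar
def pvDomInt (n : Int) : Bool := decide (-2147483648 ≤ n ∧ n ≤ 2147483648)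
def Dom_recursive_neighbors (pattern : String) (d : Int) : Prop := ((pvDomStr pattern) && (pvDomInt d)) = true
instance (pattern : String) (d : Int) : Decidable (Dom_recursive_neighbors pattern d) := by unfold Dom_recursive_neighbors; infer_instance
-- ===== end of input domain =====

-- B replaces A's top-down double recursion over (suffix, d) by a single bottom-up
-- DP over suffixes keeping one row of distance-levels (objective: alternative).

-- ===== PORT A =====
def pvChars : List Char := ['A', 'C', 'G', 'T']

-- A's recursion, on the character list; strings are built as char lists and
-- turned into String at the top level.  Python diverges (RecursionError) on
-- d < 0 and raises AssertionError on d > len(pattern); both are outside Pre_,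
-- there this port returns a dummy value.
def pvRNA : List Char → Int → List (List Char)
  | [], d => if d = 0 then [[]] else []
  | h :: t, d =>
    if d = 0 then [h :: t]
    else
      let neighbors_reduced := pvRNA t (d - 1)
      let new_arr := neighbors_reduced.flatMap
        (fun n => (pvChars.filter (fun c => c != h)).map (fun c => c :: n))
      if d < ((t.length : Int) + 1) then
        new_arr ++ (pvRNA t d).map (fun n => h :: n)
      else new_arr

def recursive_neighbors (pattern : String) (d : Int) : List String :=
  (pvRNA pattern.toList d).map (fun l => String.ofList l)

-- ===== PORT B =====
-- one loop body of Source B: mut / keep / new_row (row is never empty, so keep[0]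
-- and mut[-1] cannot raise; headD/getLastD are exact there)
def pvStepB (head : Char) (row : List (List (List Char))) : List (List (List Char)) :=
  let muts := row.map (fun lvl =>
    lvl.flatMap (fun s => (pvChars.filter (fun c => c != head)).map (fun c => c :: s)))
  let keep := row.map (fun lvl => lvl.map (fun s => head :: s))
  keep.headD [] :: (List.zipWith (· ++ ·) muts keep.tail ++ [muts.getLastD []])

def recursive_neighbors_alt (pattern : String) (d : Int) : List String :=
  let row := pattern.toList.foldr
    (fun head row => PySem.List.slice (pvStepB head row) none (some (d + 1))) [[[]]]
  -- row[d]: Python raises IndexError out of range (outside Pre_), dummy [] there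
  ((PySem.List.pyGet? row d).getD []).map (fun l => String.ofList l)

-- ===== PRECONDITION & SPEC =====
-- Pre_ excludes d < 0 (A recurses forever: RecursionError) and
-- d > len(pattern) (A's assert raises AssertionError); A returns on no such input.
def Pre_recursive_neighbors (pattern : String) (d : Int) : Prop :=
  0 ≤ d ∧ d ≤ (pattern.toList.length : Int)
instance (pattern : String) (d : Int) : Decidable (Pre_recursive_neighbors pattern d) := by
  unfold Pre_recursive_neighbors; infer_instance

def pvWitness_recursive_neighbors : String × Int := ("ACG", 1)

def Spec_recursive_neighbors (pattern : String) (d : Int) (out : List String) : Prop := out = recursive_neighbors_alt pattern d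
instance (pattern : String) (d : Int) (out : List String) : Decidable (Spec_recursive_neighbors pattern d out) := by unfold Spec_recursive_neighbors; infer_instance

-- ===== CLAIM (what is proved, stated in full; the proofs are below) =====
def Claim_equal_recursive_neighbors : Prop := ∀ (pattern : String) (d : Int), Dom_recursive_neighbors pattern d → Pre_recursive_neighbors pattern d → Spec_recursive_neighbors pattern d (recursive_neighbors pattern d)

-- ===== LEMMAS AND PROOFS =====

-- A's recursion with a Nat budget (proof-side reference function)
def pvRN : List Char → Nat → List (List Char)
  | p, 0 => [p]
  | [], _ + 1 => []
  | h :: t, k + 1 =>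
    let m := (pvRN t k).flatMap
      (fun n => (pvChars.filter (fun c => c != h)).map (fun c => c :: n))
    if k + 1 < t.length + 1 then m ++ (pvRN t (k + 1)).map (fun n => h :: n) else m

def pvMut (h : Char) (lvl : List (List Char)) : List (List Char) :=
  lvl.flatMap (fun s => (pvChars.filter (fun c => c != h)).map (fun c => c :: s))

def pvKeep (h : Char) (lvl : List (List Char)) : List (List Char) :=
  lvl.map (fun s => h :: s)

lemma pvRNA_eq_pvRN (p : List Char) : ∀ d : Int, 0 ≤ d → d ≤ p.length →
    pvRNA p d = pvRN p d.toNat := by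
  induction p with
  | nil =>
    intro d h0 hl
    have hz : d = 0 := by simpa using le_antisymm (by simpa using hl) h0
    subst hz; simp [pvRNA, pvRN]
  | cons h t ih =>
    intro d h0 hl
    by_cases hz : d = 0
    · subst hz; simp [pvRNA, pvRN]
    · have htn : d.toNat = (d - 1).toNat + 1 := by omega
      have hd1 : pvRNA t (d - 1) = pvRN t (d - 1).toNat := by
        refine ih (d - 1) (by omega) ?_
        simp only [List.length_cons] at hl; push_cast at hl ⊢; omega
      rw [pvRNA, htn, pvRN]
      simp only [hz, if_false]
      by_cases hc : d < ((t.length : Int) + 1)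
      · have hc' : (d - 1).toNat + 1 < t.length + 1 := by omega
        have hd2 : pvRNA t d = pvRN t d.toNat := by
          refine ih d h0 ?_; omega
        rw [if_pos hc, if_pos hc', hd1, hd2, htn]
      · have hc' : ¬ ((d - 1).toNat + 1 < t.length + 1) := by omega
        rw [if_neg hc, if_neg hc', hd1]

lemma pvStepB_spec (h : Char) (t : List Char) (m : Nat) (hm : m ≤ t.length) :
    pvStepB h ((List.range (m + 1)).map (pvRN t)) =
      (List.range (m + 1)).map (pvRN (h :: t)) ++ [pvMut h (pvRN t m)] := by
  apply List.ext_getElem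
  · simp [pvStepB, List.length_zipWith]
  · intro i h1 h2
    simp only [pvStepB, List.map_map]
    cases i with
    | zero =>
      have hh : ∀ (F : ℕ → List (List Char)), ((List.range (m + 1)).map F).headD [] = F 0 := by
        intro F; rw [List.range_succ_eq_map]; simp
      rw [List.getElem_cons_zero, hh]
      simp [pvRN]
    | succ j =>
      have hj : j < m + 1 := by
        by_contra hcon
        simp [pvStepB, List.length_zipWith] at h1
        omega
      rw [List.getElem_cons_succ]
      by_cases hjm : j < m
      · rw [List.getElem_append_left (by simp [List.length_zipWith]; omega)]
        rw [List.getElem_zipWith]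
        rw [List.getElem_append_left (by simp; omega)]
        simp only [List.getElem_map, List.getElem_range, List.getElem_tail]
        have hcond : j + 1 < t.length + 1 := by omega
        conv_rhs => rw [pvRN]
        simp [hcond]
      · have hjm' : m = j := by omega
        subst hjm'
        rw [List.getElem_append_right (by simp [List.length_zipWith])]
        rw [List.getElem_append_right (by simp)]
        simp only [Function.comp_def, List.length_zipWith, List.length_map, List.length_range,
          List.length_tail]
        have hgl : ((List.range (m + 1)).map
            (fun k => ((pvRN t k).flatMap (fun s => (pvChars.filter (fun c => c != h)).map (fun c => c :: s))))).getLastD []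
            = (pvRN t m).flatMap (fun s => (pvChars.filter (fun c => c != h)).map (fun c => c :: s)) := by
          rw [List.range_succ, List.map_append]
          exact List.getLastD_concat
        have hlast : (List.range (m + 1)).getLast? = some m := by
          rw [List.range_succ]; exact List.getLast?_concat
        simp [hlast, pvMut]

lemma pv_row_spec (d : Int) (hd : 0 ≤ d) (p : List Char) :
    p.foldr (fun head row => PySem.List.slice (pvStepB head row) none (some (d + 1))) [[[]]]
      = (List.range (min p.length d.toNat + 1)).map (pvRN p) := by
  induction p with
  | nil => simp [pvRN]
  | cons h t ih =>
    rw [List.foldr_cons, ih]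
    have hm : min t.length d.toNat ≤ t.length := min_le_left _ _
    rw [pvStepB_spec h t _ hm]
    rw [PySem.List.slice_to _ (by omega)]
    have htn : (d + 1).toNat = d.toNat + 1 := by omega
    rw [htn]
    by_cases hcase : d.toNat ≤ t.length
    · have hmin : min t.length d.toNat = d.toNat := min_eq_right hcase
      have hmin' : min (h :: t).length d.toNat = d.toNat := by
        simp only [List.length_cons]; omega
      rw [hmin, hmin', List.take_append_of_le_length (by simp), List.take_of_length_le (by simp)]
    · have hmin : min t.length d.toNat = t.length := min_eq_left (by omega)
      have hmin' : min (h :: t).length d.toNat = t.length + 1 := by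
        simp only [List.length_cons]; omega
      rw [hmin, hmin', List.take_of_length_le (by simp; omega)]
      have hlast : pvMut h (pvRN t t.length) = pvRN (h :: t) (t.length + 1) := by
        conv_rhs => rw [pvRN]
        simp [pvMut]
      rw [hlast]
      conv_rhs => rw [List.range_succ, List.map_append]
      simp

-- ===== VERDICT (by name: the statement is the Claim_ definition above) =====
theorem recursive_neighbors_spec : Claim_equal_recursive_neighbors := by
  intro pattern d _ hpre
  obtain ⟨h0, hl⟩ := hpre
  unfold Spec_recursive_neighbors recursive_neighbors recursive_neighbors_alt
  rw [pvRNA_eq_pvRN _ _ h0 hl, pv_row_spec d h0]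
  have hmin : min pattern.toList.length d.toNat = d.toNat := min_eq_right (by omega)
  rw [hmin]
  have hd' : d = ((d.toNat : Nat) : Int) := (Int.toNat_of_nonneg h0).symm
  rw [hd']
  simp only [Int.toNat_natCast]
  rw [PySem.List.pyGet?_natCast]
  rw [List.getElem?_map, List.getElem?_range (Nat.lt_succ_self _)]
  simp
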